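-- pv_equiv track=rewrite | github.com/jhffmn82/wordle-ML-project | web/pages/2_Autoplay.py | render_game
-- ===== SOURCE A (Python) =====
-- def render_game(guesses, feedbacks):
--     """Render played game as Wordle grid."""
--     html = '<div class="grid-container">'
--     for r in range(6):
--         html += '<div class="grid-row">'
--         for c in range(5):
--             if r < len(guesses):
--                 letter = guesses[r][c]
--                 fb = feedbacks[r][c]
--                 if fb == 2:
--                     css = "grid-tile grid-tile-green"
--                 elif fb == 1:
--                     css = "grid-tile grid-tile-yellow"
--                 else:
--                     css = "grid-tile grid-tile-gray"
--                 html += f'<div class="{css}">{letter.upper()}</div>'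
--             else:
--                 html += '<div class="grid-tile grid-tile-empty"> </div>'
--         html += '</div>'
--     html += '</div>'
--     return html
-- ===== SOURCE B (Python) =====
-- def render_game(guesses, feedbacks):
--     """Render played game as Wordle grid."""
--     CSS = {2: "grid-tile grid-tile-green", 1: "grid-tile grid-tile-yellow"}
--     EMPTY_ROW = '<div class="grid-tile grid-tile-empty"> </div>' * 5
--
--     def build(gs, fs, remaining):
--         if remaining == 0:
--             return ''
--         if gs:
--             g, f = gs[0], fs[0]
--             body = ''.join(
--                 f'<div class="{CSS.get(f[c], "grid-tile grid-tile-gray")}">{g[c].upper()}</div>'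
--                 for c in range(5))
--             return '<div class="grid-row">' + body + '</div>' + build(gs[1:], fs[1:], remaining - 1)
--         return '<div class="grid-row">' + EMPTY_ROW + '</div>' + build(gs, fs, remaining - 1)
--
--     return '<div class="grid-container">' + build(guesses, feedbacks, 6) + '</div>'
-- ===== Notes on version B (the rewrite author's own statement) =====
-- stated objective: alternative
-- what changed: B replaces A's fixed 6x5 index loops (range(6)/range(5) with a per-cell r<len(guesses) branch and if/elif css chain) by structural recursion over the guess/feedback lists with a row countdown: each step consumes the head guess/feedback pair and joins its five tiles (css via a dict lookup), and once the lists are exhausted the remaining rows are emitted from a precomputed empty-row string.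
import Mathlib
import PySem

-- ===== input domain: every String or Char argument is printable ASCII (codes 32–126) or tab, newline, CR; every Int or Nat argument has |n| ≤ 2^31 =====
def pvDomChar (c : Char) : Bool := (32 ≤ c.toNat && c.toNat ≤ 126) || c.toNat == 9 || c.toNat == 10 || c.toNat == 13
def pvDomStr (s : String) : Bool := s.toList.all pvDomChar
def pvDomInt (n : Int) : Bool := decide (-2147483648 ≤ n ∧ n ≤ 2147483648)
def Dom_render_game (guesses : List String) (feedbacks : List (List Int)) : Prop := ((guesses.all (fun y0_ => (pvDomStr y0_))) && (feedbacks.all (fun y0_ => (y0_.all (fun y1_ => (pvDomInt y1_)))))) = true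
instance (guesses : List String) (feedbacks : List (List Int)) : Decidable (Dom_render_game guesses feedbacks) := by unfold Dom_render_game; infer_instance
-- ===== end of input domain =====

-- B rebuilds the same Wordle-grid HTML by structural recursion over the guess/feedback lists with a
-- row countdown (head row joined from a per-cell comprehension, css via a dict, empty rows once the
-- lists are exhausted) instead of A's fixed 6×5 index loops with a per-cell branch; objective: alternative.

-- ===== PORT A =====
-- the css chain of A's inner loop, kept as a helper (branches in A's order)
def cssA (fb : Int) : String :=
  if fb = 2 then "grid-tile grid-tile-green"
  else if fb = 1 then "grid-tile grid-tile-yellow"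
  else "grid-tile grid-tile-gray"

-- body of A's inner 'for c in range(5)' loop; guesses[r][c] / feedbacks[r][c] are ported with the
-- total pyGetD / (pyGet? …).getD forms — Pre_render_game excludes exactly the inputs where Python raises
def stepA (guesses : List String) (feedbacks : List (List Int)) (r : Int) (html : String) (c : Int) : String :=
  if r < PySem.List.len guesses then
    let letter : Char := (PySem.Str.pyGet? (PySem.List.pyGetD guesses r "") c).getD ' '
    let fb : Int := PySem.List.pyGetD (PySem.List.pyGetD feedbacks r []) c 0
    html ++ "<div class=\"" ++ cssA fb ++ "\">" ++ PySem.Str.upper (String.ofList [letter]) ++ "</div>"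
  else
    html ++ "<div class=\"grid-tile grid-tile-empty\"> </div>"

def render_game (guesses : List String) (feedbacks : List (List Int)) : String :=
  ((PySem.List.pyRange 0 6 1).foldl
    (fun html r =>
      ((PySem.List.pyRange 0 5 1).foldl (stepA guesses feedbacks r)
        (html ++ "<div class=\"grid-row\">")) ++ "</div>")
    "<div class=\"grid-container\">") ++ "</div>"

-- ===== PORT B =====
def cssDictB : PySem.Dict Int String :=
  PySem.Dict.ofList [(2, "grid-tile grid-tile-green"), (1, "grid-tile grid-tile-yellow")]

def tileB (letter : Char) (fb : Int) : String :=
  "<div class=\"" ++ PySem.Dict.getD cssDictB fb "grid-tile grid-tile-gray" ++ "\">"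
    ++ PySem.Str.upper (String.ofList [letter]) ++ "</div>"

-- EMPTY_ROW = '<div class="grid-tile grid-tile-empty"> </div>' * 5  (string repetition = pyRepeat on code points)
def emptyRowB : String :=
  String.ofList (PySem.List.pyRepeat "<div class=\"grid-tile grid-tile-empty\"> </div>".toList 5)

-- def build(gs, fs, remaining): structural recursion; fs[0], g[c] and f[c] are ported with the
-- total pyGetD / (pyGet? …).getD forms — Pre_render_game excludes exactly the inputs where Python raises
def buildB (gs : List String) (fs : List (List Int)) : Nat → String
  | 0 => ""
  | k + 1 =>
    match gs with
    | g :: gs' =>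
      let f := PySem.List.pyGetD fs 0 ([] : List Int)
      let body := PySem.Str.join ""
        ((PySem.List.pyRange 0 5 1).map (fun c =>
          tileB ((PySem.Str.pyGet? g c).getD ' ') (PySem.List.pyGetD f c 0)))
      "<div class=\"grid-row\">" ++ body ++ "</div>"
        ++ buildB (PySem.List.slice (g :: gs') (some 1) none) (PySem.List.slice fs (some 1) none) k
    | [] => "<div class=\"grid-row\">" ++ emptyRowB ++ "</div>" ++ buildB gs fs k

def render_game_alt (guesses : List String) (feedbacks : List (List Int)) : String :=
  "<div class=\"grid-container\">" ++ buildB guesses feedbacks 6 ++ "</div>"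

-- ===== PRECONDITION & SPEC =====
-- Pre_ excludes exactly the inputs where A raises IndexError: a filled row (r < min(len(guesses),6))
-- whose guess string or feedback list has fewer than 5 entries, or with no feedbacks[r] at all.
def Pre_render_game (guesses : List String) (feedbacks : List (List Int)) : Prop :=
  min guesses.length 6 ≤ feedbacks.length ∧
  ∀ r < min guesses.length 6,
    5 ≤ (guesses.getD r "").toList.length ∧ 5 ≤ (feedbacks.getD r []).length

instance (guesses : List String) (feedbacks : List (List Int)) : Decidable (Pre_render_game guesses feedbacks) := by
  unfold Pre_render_game; infer_instance

def pvWitness_render_game : List String × List (List Int) := (["crane"], [[0, 1, 2, 0, 1]])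

def Spec_render_game (guesses : List String) (feedbacks : List (List Int)) (out : String) : Prop := out = render_game_alt guesses feedbacks
instance (guesses : List String) (feedbacks : List (List Int)) (out : String) : Decidable (Spec_render_game guesses feedbacks out) := by unfold Spec_render_game; infer_instance

-- ===== CLAIM (what is proved, stated in full; the proofs are below) =====
def Claim_equal_render_game : Prop := ∀ (guesses : List String) (feedbacks : List (List Int)), Dom_render_game guesses feedbacks → Pre_render_game guesses feedbacks → Spec_render_game guesses feedbacks (render_game guesses feedbacks)

-- ===== LEMMAS AND PROOFS =====

-- (a == b) on Int with the scrutinee on the left, as a decide — used to evaluate B's dict lookup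
theorem beq_swap (a fb : Int) : (a == fb) = decide (fb = a) := by
  rcases eq_or_ne fb a with h|h
  · subst h; simp
  · simp [h, Ne.symm h]

theorem cssDictB_getD (fb : Int) : PySem.Dict.getD cssDictB fb "grid-tile grid-tile-gray" = cssA fb := by
  by_cases h2 : fb = 2 <;> by_cases h1 : fb = 1 <;>
    simp [cssA, PySem.Dict.getD, cssDictB, PySem.Dict.ofList, PySem.Dict.get?, PySem.Dict.update,
      PySem.Dict.insert, PySem.Dict.empty, List.find?, beq_swap, h2, h1]

-- ''.join over the empty separator is plain concatenation
theorem join_empty_nil : PySem.Str.join "" ([] : List String) = "" := by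
  apply String.toList_inj.mp
  simp [PySem.Str.toList_join, PySem.Chars.join_nil]

theorem join_empty_cons (s : String) (r : List String) :
    PySem.Str.join "" (s :: r) = s ++ PySem.Str.join "" r := by
  cases r with
  | nil =>
    apply String.toList_inj.mp
    simp [PySem.Str.toList_join, PySem.Chars.join_singleton, PySem.Chars.join_nil]
  | cons t r =>
    apply String.toList_inj.mp
    simp [PySem.Str.toList_join, PySem.Chars.join_cons_cons]

-- a filled row of A (inner 'for c in range(5)' fold) equals html ++ B's filled-row string for that row's data
set_option maxRecDepth 8192 in
theorem rowA_filled (guesses : List String) (feedbacks : List (List Int)) (r : Int) (html : String)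
    (g : String) (f : List Int)
    (hr : r < PySem.List.len guesses)
    (hg : PySem.List.pyGetD guesses r "" = g) (hf : PySem.List.pyGetD feedbacks r [] = f)
    (hg5 : 5 ≤ g.toList.length) (hf5 : 5 ≤ f.length) :
    ((PySem.List.pyRange 0 5 1).foldl (stepA guesses feedbacks r)
      (html ++ "<div class=\"grid-row\">")) ++ "</div>"
    = html ++ ("<div class=\"grid-row\">"
        ++ PySem.Str.join ""
            ((PySem.List.pyRange 0 5 1).map (fun c =>
              tileB ((PySem.Str.pyGet? g c).getD ' ') (PySem.List.pyGetD f c 0)))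
        ++ "</div>") := by
  obtain ⟨a, b, c, d, e, t, hL⟩ : ∃ a b c d e t, g.toList = a::b::c::d::e::t := by
    match hL : g.toList, hg5 with
    | a::b::c::d::e::t, _ => exact ⟨a,b,c,d,e,t, rfl⟩
  obtain ⟨x, y, z, u, v, w, hF⟩ : ∃ x y z u v w, f = x::y::z::u::v::w := by
    match f, hf5 with
    | x::y::z::u::v::w, _ => exact ⟨x,y,z,u,v,w, rfl⟩
  have get0 : PySem.Str.pyGet? g 0 = some a := by
    simp [PySem.Str.pyGet?, hL, PySem.List.pyGet?, PySem.List.pyIdx?]; rw [if_pos (by omega)]; simp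
  have get1 : PySem.Str.pyGet? g 1 = some b := by
    simp [PySem.Str.pyGet?, hL, PySem.List.pyGet?, PySem.List.pyIdx?]; rw [if_pos (by omega)]; simp
  have get2 : PySem.Str.pyGet? g 2 = some c := by
    simp [PySem.Str.pyGet?, hL, PySem.List.pyGet?, PySem.List.pyIdx?]; rw [if_pos (by omega)]; simp
  have get3 : PySem.Str.pyGet? g 3 = some d := by
    simp [PySem.Str.pyGet?, hL, PySem.List.pyGet?, PySem.List.pyIdx?]; rw [if_pos (by omega)]; simp
  have get4 : PySem.Str.pyGet? g 4 = some e := by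
    simp [PySem.Str.pyGet?, hL, PySem.List.pyGet?, PySem.List.pyIdx?]; rw [if_pos (by omega)]; simp
  have gd0 : PySem.List.pyGetD (x::y::z::u::v::w) (0:Int) (0:Int) = x := by
    simp [PySem.List.pyGetD, PySem.List.pyGet?, PySem.List.pyIdx?]; rw [if_pos (by omega)]; simp
  have gd1 : PySem.List.pyGetD (x::y::z::u::v::w) (1:Int) (0:Int) = y := by
    simp [PySem.List.pyGetD, PySem.List.pyGet?, PySem.List.pyIdx?]; rw [if_pos (by omega)]; simp
  have gd2 : PySem.List.pyGetD (x::y::z::u::v::w) (2:Int) (0:Int) = z := by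
    simp [PySem.List.pyGetD, PySem.List.pyGet?, PySem.List.pyIdx?]; rw [if_pos (by omega)]; simp
  have gd3 : PySem.List.pyGetD (x::y::z::u::v::w) (3:Int) (0:Int) = u := by
    simp [PySem.List.pyGetD, PySem.List.pyGet?, PySem.List.pyIdx?]; rw [if_pos (by omega)]; simp
  have gd4 : PySem.List.pyGetD (x::y::z::u::v::w) (4:Int) (0:Int) = v := by
    simp [PySem.List.pyGetD, PySem.List.pyGet?, PySem.List.pyIdx?]; rw [if_pos (by omega)]; simp
  rw [show PySem.List.pyRange 0 5 1 = [0,1,2,3,4] from by decide]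
  simp only [List.foldl, stepA, if_pos hr, hg, hf, hF, gd0, gd1, gd2, gd3, gd4,
    get0, get1, get2, get3, get4]
  simp only [List.map, gd0, gd1, gd2, gd3, gd4, get0, get1, get2, get3, get4, Option.getD_some]
  simp [tileB, cssDictB_getD, join_empty_cons, join_empty_nil, String.append_assoc]
  try (apply String.toList_inj.mp; simp)

-- an unfilled row of A equals html ++ B's empty row
set_option maxRecDepth 8192 in
theorem rowA_empty (guesses : List String) (feedbacks : List (List Int)) (r : Int) (html : String)
    (hr : ¬ r < PySem.List.len guesses) :
    ((PySem.List.pyRange 0 5 1).foldl (stepA guesses feedbacks r)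
      (html ++ "<div class=\"grid-row\">")) ++ "</div>"
    = html ++ ("<div class=\"grid-row\">" ++ emptyRowB ++ "</div>") := by
  rw [show PySem.List.pyRange 0 5 1 = [0,1,2,3,4] from by decide]
  simp only [List.foldl, stepA, if_neg hr]
  rw [show emptyRowB
      = "<div class=\"grid-tile grid-tile-empty\"> </div>" ++ "<div class=\"grid-tile grid-tile-empty\"> </div>"
        ++ "<div class=\"grid-tile grid-tile-empty\"> </div>" ++ "<div class=\"grid-tile grid-tile-empty\"> </div>"
        ++ "<div class=\"grid-tile grid-tile-empty\"> </div>" from by decide]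
  apply String.toList_inj.mp; simp

-- the empty-row branch of buildB never inspects fs
theorem buildB_nil_congr (fs fs' : List (List Int)) : ∀ k, buildB [] fs k = buildB [] fs' k := by
  intro k
  induction k with
  | zero => rfl
  | succ k ih => simp only [buildB]; rw [ih]

-- the main loop invariant: the last k rows of A's outer fold append buildB of the dropped lists
theorem build_eq (guesses : List String) (feedbacks : List (List Int))
    (hPre : Pre_render_game guesses feedbacks) :
    ∀ (k : Nat), k ≤ 6 → ∀ html,
      (PySem.List.pyRange ((6:Int) - k) 6 1).foldl
        (fun html r =>
          ((PySem.List.pyRange 0 5 1).foldl (stepA guesses feedbacks r)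
            (html ++ "<div class=\"grid-row\">")) ++ "</div>")
        html
      = html ++ buildB (guesses.drop (6 - k)) (feedbacks.drop (6 - k)) k := by
  intro k
  induction k with
  | zero =>
    intro _ html
    rw [show ((6:Int) - ((0:Nat):Int)) = 6 from by norm_num,
        PySem.List.pyRange_one_eq_nil (le_refl (6:Int))]
    simp [buildB]
  | succ k ih =>
    intro hk html
    obtain ⟨n, hn⟩ : ∃ n, 6 - (k + 1) = n := ⟨_, rfl⟩
    have hcast : (6:Int) - (↑(k + 1) : Int) = ((n : Nat) : Int) := by push_cast; omega
    have hcons : PySem.List.pyRange ((n:Nat):Int) 6 1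
        = ((n:Nat):Int) :: PySem.List.pyRange (((n:Nat):Int) + 1) 6 1 :=
      PySem.List.pyRange_one_cons (by omega)
    have hrest : (((n:Nat):Int) + 1) = ((6:Int) - (k:Int)) := by omega
    rw [hcast, hcons]
    simp only [List.foldl]
    rw [hn]
    by_cases hlt : n < guesses.length
    · -- filled row
      have hflen : n < feedbacks.length := by
        have h1 := hPre.1; omega
      have hrow := hPre.2 n (by omega)
      rw [rowA_filled guesses feedbacks ((n:Nat):Int) html (guesses.getD n "") (feedbacks.getD n [])
        (by simp [PySem.List.len_eq]; exact_mod_cast hlt)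
        (PySem.List.pyGetD_natCast guesses n "")
        (PySem.List.pyGetD_natCast feedbacks n [])
        hrow.1 hrow.2]
      rw [hrest, ih (by omega) _]
      have hgdrop : guesses.drop n = guesses.getD n "" :: guesses.drop (n + 1) := by
        rw [List.drop_eq_getElem_cons hlt, List.getD_eq_getElem guesses "" hlt]
      have hfdrop : feedbacks.drop n = feedbacks.getD n [] :: feedbacks.drop (n + 1) := by
        rw [List.drop_eq_getElem_cons hflen, List.getD_eq_getElem feedbacks [] hflen]
      have hsucc : 6 - k = n + 1 := by omega
      rw [hgdrop, hsucc]
      simp only [buildB, PySem.List.slice_from_one, List.tail_cons]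
      have hpg : PySem.List.pyGetD (feedbacks.drop n) 0 ([] : List Int) = feedbacks.getD n [] := by
        rw [hfdrop]; simp [PySem.List.pyGetD, PySem.List.pyGet?, PySem.List.pyIdx?]
      rw [hpg]
      have hft : (feedbacks.drop n).tail = feedbacks.drop (n + 1) := by
        rw [← List.drop_drop]; simp
      rw [hft]
      apply String.toList_inj.mp; simp
    · -- empty row
      rw [rowA_empty guesses feedbacks ((n:Nat):Int) html
        (by simp [PySem.List.len_eq]; exact_mod_cast Nat.le_of_not_lt hlt)]
      rw [hrest, ih (by omega) _]
      have hge : guesses.drop n = [] := List.drop_eq_nil_of_le (by omega)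
      have hge' : guesses.drop (6 - k) = [] := List.drop_eq_nil_of_le (by omega)
      rw [hge, hge']
      simp only [buildB]
      rw [buildB_nil_congr (feedbacks.drop (6 - k)) (feedbacks.drop n) k]
      apply String.toList_inj.mp; simp

-- ===== VERDICT (by name: the statement is the Claim_ definition above) =====
theorem render_game_spec : Claim_equal_render_game := by
  intro guesses feedbacks _ hPre
  unfold Spec_render_game render_game render_game_alt
  have h := build_eq guesses feedbacks hPre 6 (by omega) "<div class=\"grid-container\">"
  norm_num at h
  rw [h]
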